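-- pv_equiv track=rewrite | github.com/BERDataLakehouse/spark_notebook | notebook_utils/berdl_notebook_utils/spark/data_store.py | _filter_to_user_namespaces
-- ===== SOURCE A (Python) =====
-- from typing import Any, Dict, List, Optional, Union
--
-- def _filter_to_user_namespaces(
--     databases: List[str],
--     username: str,
--     personal_aliases: set[str],
--     tenant_aliases: set[str],
-- ) -> List[str]:
--     """Filter ``databases`` to those owned by the user or accessible via tenants.
--
--     Iceberg ``catalog.namespace`` entries are kept when the catalog matches
--     the user's personal or tenant aliases. Hive flat names are kept when
--     they start with ``u_{username}__`` (own personal) or ``{tenant}_`` for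
--     any tenant the user belongs to.
--     """
--     user_prefix = f"u_{username}__"
--     allowed_catalogs = personal_aliases | tenant_aliases
--
--     result: List[str] = []
--     for db in databases:
--         if "." in db:
--             catalog = db.split(".", 1)[0]
--             if catalog in allowed_catalogs:
--                 result.append(db)
--         else:
--             if db.startswith(user_prefix):
--                 result.append(db)
--             elif any(db.startswith(f"{t}_") for t in tenant_aliases):
--                 result.append(db)
--     return result
-- ===== SOURCE B (Python) =====
-- from typing import List
--
-- def _keep(db, user_prefix, personal_aliases, tenant_aliases):
--     if "." in db:
--         catalog = db.split(".", 1)[0]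
--         return catalog in personal_aliases or catalog in tenant_aliases
--     if db.startswith(user_prefix):
--         return True
--     return any(db[:i] in tenant_aliases for i in range(len(db)) if db[i] == "_")
--
-- def _filter_to_user_namespaces(
--     databases: List[str],
--     username: str,
--     personal_aliases: set,
--     tenant_aliases: set,
-- ) -> List[str]:
--     user_prefix = f"u_{username}__"
--     return [db for db in databases
--             if _keep(db, user_prefix, personal_aliases, tenant_aliases)]
-- ===== Notes on version B (the rewrite author's own statement) =====
-- stated objective: faster
-- what changed: Replaces A's per-database inner scan over all tenant aliases (any(db.startswith(t+'_'))) with a set-membership test of the prefix ending at each underscore position of the name, and builds the result as a filter with a keep predicate instead of an accumulating loop.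
import Mathlib
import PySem

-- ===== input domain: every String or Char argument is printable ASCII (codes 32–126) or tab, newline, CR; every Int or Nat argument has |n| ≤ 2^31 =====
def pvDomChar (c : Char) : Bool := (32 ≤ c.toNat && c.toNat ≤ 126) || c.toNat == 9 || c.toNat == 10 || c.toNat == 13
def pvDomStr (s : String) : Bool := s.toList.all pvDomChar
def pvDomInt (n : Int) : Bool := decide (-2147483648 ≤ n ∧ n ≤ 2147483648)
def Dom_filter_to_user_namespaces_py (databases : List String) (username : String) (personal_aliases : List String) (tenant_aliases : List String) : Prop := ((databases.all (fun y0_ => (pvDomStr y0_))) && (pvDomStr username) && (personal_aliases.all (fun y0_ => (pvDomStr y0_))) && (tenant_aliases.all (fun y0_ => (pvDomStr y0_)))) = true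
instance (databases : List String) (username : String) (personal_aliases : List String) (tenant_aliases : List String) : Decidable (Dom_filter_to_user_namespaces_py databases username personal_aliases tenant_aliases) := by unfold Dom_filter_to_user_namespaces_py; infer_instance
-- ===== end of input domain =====

-- B replaces A's inner scan over all tenant aliases (any(db.startswith(t+"_")))
-- by a hash-set membership test of the prefix ending at each underscore position of db
-- (objective: faster when there are many tenants).

-- ===== PORT A =====
def filter_to_user_namespaces_py (databases : List String) (username : String) (personal_aliases : List String) (tenant_aliases : List String) : List String :=
  let user_prefix : List Char := ('u' :: '_' :: username.toList) ++ ['_', '_']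
  let allowed_catalogs : PySem.Set String := PySem.Set.union personal_aliases tenant_aliases
  databases.foldl (fun result db =>
    if PySem.Chars.isIn ['.'] db.toList then
      -- db.split(".", 1)[0]: splitting on a nonempty separator always yields a
      -- nonempty list, so the [0] index never raises; getD/headD are exact here
      let catalog := ((PySem.Str.splitMax? db "." 1).getD []).headD ""
      if PySem.Set.contains allowed_catalogs catalog then result ++ [db] else result
    else
      if PySem.Chars.startswith db.toList user_prefix then result ++ [db]
      else if tenant_aliases.any (fun t => PySem.Chars.startswith db.toList (t.toList ++ ['_'])) then result ++ [db]
      else result) []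

-- ===== PORT B =====
def pvAltKeep (db : String) (user_prefix : List Char) (personal_aliases : List String) (tenant_aliases : List String) : Bool :=
  if PySem.Chars.isIn ['.'] db.toList then
    -- db.split(".", 1)[0]: nonempty separator, split never empty, [0] never raises
    let catalog := ((PySem.Str.splitMax? db "." 1).getD []).headD ""
    personal_aliases.contains catalog || tenant_aliases.contains catalog
  else if PySem.Chars.startswith db.toList user_prefix then
    true
  else
    (List.range db.toList.length).any (fun i =>
      db.toList[i]? == some '_' && tenant_aliases.contains (String.ofList (db.toList.take i)))

def filter_to_user_namespaces_py_alt (databases : List String) (username : String) (personal_aliases : List String) (tenant_aliases : List String) : List String :=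
  let user_prefix : List Char := ('u' :: '_' :: username.toList) ++ ['_', '_']
  databases.filter (fun db => pvAltKeep db user_prefix personal_aliases tenant_aliases)

-- ===== PRECONDITION & SPEC =====
def Spec_filter_to_user_namespaces_py (databases : List String) (username : String) (personal_aliases : List String) (tenant_aliases : List String) (out : List String) : Prop := out = filter_to_user_namespaces_py_alt databases username personal_aliases tenant_aliases
instance (databases : List String) (username : String) (personal_aliases : List String) (tenant_aliases : List String) (out : List String) : Decidable (Spec_filter_to_user_namespaces_py databases username personal_aliases tenant_aliases out) := by unfold Spec_filter_to_user_namespaces_py; infer_instance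

-- ===== CLAIM (what is proved, stated in full; the proofs are below) =====
def Claim_equal_filter_to_user_namespaces_py : Prop := ∀ (databases : List String) (username : String) (personal_aliases : List String) (tenant_aliases : List String), Dom_filter_to_user_namespaces_py databases username personal_aliases tenant_aliases → Spec_filter_to_user_namespaces_py databases username personal_aliases tenant_aliases (filter_to_user_namespaces_py databases username personal_aliases tenant_aliases)

-- ===== LEMMAS AND PROOFS =====

-- "db starts with t + '_' for some tenant t" is exactly "some underscore position i
-- of db has db[:i] among the tenants".
theorem pv_any_tenant_prefix (db : List Char) (tens : List String) :
    tens.any (fun t => PySem.Chars.startswith db (t.toList ++ ['_'])) =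
    (List.range db.length).any (fun i =>
      db[i]? == some '_' && tens.contains (String.ofList (db.take i))) := by
  rw [Bool.eq_iff_iff]
  simp only [List.any_eq_true, PySem.Chars.startswith_iff, List.mem_range,
    Bool.and_eq_true, beq_iff_eq, List.contains_eq_mem, decide_eq_true_eq]
  constructor
  · rintro ⟨t, ht, s, hs⟩
    subst hs
    refine ⟨t.toList.length, ?_, ?_, ?_⟩
    · simp
    · rw [List.append_assoc]
      simp
    · rw [List.append_assoc, List.take_left, String.ofList_toList]
      exact ht
  · rintro ⟨i, hi, hget, hmem⟩
    refine ⟨String.ofList (db.take i), hmem, db.drop (i + 1), ?_⟩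
    have h1 : db.drop i = db[i] :: db.drop (i + 1) := List.drop_eq_getElem_cons hi
    have h2 : db[i] = '_' := by
      have := List.getElem?_eq_getElem hi
      rw [this] at hget; exact Option.some.inj hget
    rw [String.toList_ofList, List.append_assoc]
    have h3 := List.take_append_drop i db
    rw [h1, h2] at h3
    exact h3

-- per-database: A's keep decision equals B's keep predicate
theorem pv_keep_eq (db : String) (upfx : List Char) (pers tens : List String) (result : List String) :
    (if PySem.Chars.isIn ['.'] db.toList then
      if PySem.Set.contains (PySem.Set.union pers tens)
          (((PySem.Str.splitMax? db "." 1).getD []).headD "") then result ++ [db] else result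
    else
      if PySem.Chars.startswith db.toList upfx then result ++ [db]
      else if tens.any (fun t => PySem.Chars.startswith db.toList (t.toList ++ ['_'])) then result ++ [db]
      else result)
    = (if pvAltKeep db upfx pers tens then result ++ [db] else result) := by
  unfold pvAltKeep PySem.Set.contains
  rw [pv_any_tenant_prefix]
  split_ifs with h1 h2 h3 h4 h5 h6 h7 <;> first
    | rfl
    | (exfalso; simp_all)

-- ===== VERDICT (by name: the statement is the Claim_ definition above) =====
theorem filter_to_user_namespaces_py_spec : Claim_equal_filter_to_user_namespaces_py := by
  intro databases username pers tens _
  unfold Spec_filter_to_user_namespaces_py filter_to_user_namespaces_py filter_to_user_namespaces_py_alt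
  have hbody :
      (fun (result : List String) (db : String) =>
        if PySem.Chars.isIn ['.'] db.toList then
          if PySem.Set.contains (PySem.Set.union pers tens)
              (((PySem.Str.splitMax? db "." 1).getD []).headD "") then result ++ [db] else result
        else
          if PySem.Chars.startswith db.toList (('u' :: '_' :: username.toList) ++ ['_', '_']) then result ++ [db]
          else if tens.any (fun t => PySem.Chars.startswith db.toList (t.toList ++ ['_'])) then result ++ [db]
          else result)
      = (fun result db =>
          if pvAltKeep db (('u' :: '_' :: username.toList) ++ ['_', '_']) pers tens then
            result ++ [db] else result) := by
    funext result db
    exact pv_keep_eq db _ pers tens result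
  simp only [hbody]
  have hfi := PySem.List.foldl_append_if
    (fun db => pvAltKeep db (('u' :: '_' :: username.toList) ++ ['_', '_']) pers tens) id databases []
  simpa [id] using hfi
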